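-- pv_equiv track=rewrite | github.com/stfc-aeg/lpd-detector | app/lpd/fem/asic_setup_params.py | bitshiftSlowControlArray
-- ===== SOURCE A (Python) =====
-- def bitshiftSlowControlArray(seq, numBits):
--     '''
--         Helper function: (Left-)bitshift sequence 'seq' by 'numBits' bits
--     '''
--     lastIndexExcess = 0
--     for idx in range(len(seq)):
--         # Bitshift
--         seq[idx] = seq[idx] << numBits
--         # Add any bits shifted in from the previous index
--         seq[idx] = seq[idx] | lastIndexExcess
--         # Save anything beyond the 32 bit boundary for the next index
--         lastIndexExcess = seq[idx] >> 32
--         # Throwaway any bits beyond the 32 bit boundary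
--         seq[idx]= seq[idx] & 0xFFFFFFFF
--
--     return seq
-- ===== SOURCE B (Python) =====
-- def bitshiftSlowControlArray(seq, numBits):
--     '''Pack 'seq' into one big little-endian integer, shift once, unpack back.'''
--     if not seq:
--         return seq
--     acc = 0
--     for w in reversed(seq):
--         acc = (acc << 32) | w
--     acc <<= numBits
--     for i in range(len(seq)):
--         seq[i] = acc & 0xFFFFFFFF
--         acc >>= 32
--     return seq
-- ===== Notes on version B (the rewrite author's own statement) =====
-- stated objective: faster
-- what changed: A propagates a 32-bit carry word by word in a Python-level loop; B packs the whole list into one arbitrary-precision integer, performs a single big shift in C, and unpacks it back into 32-bit words.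
import Mathlib
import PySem

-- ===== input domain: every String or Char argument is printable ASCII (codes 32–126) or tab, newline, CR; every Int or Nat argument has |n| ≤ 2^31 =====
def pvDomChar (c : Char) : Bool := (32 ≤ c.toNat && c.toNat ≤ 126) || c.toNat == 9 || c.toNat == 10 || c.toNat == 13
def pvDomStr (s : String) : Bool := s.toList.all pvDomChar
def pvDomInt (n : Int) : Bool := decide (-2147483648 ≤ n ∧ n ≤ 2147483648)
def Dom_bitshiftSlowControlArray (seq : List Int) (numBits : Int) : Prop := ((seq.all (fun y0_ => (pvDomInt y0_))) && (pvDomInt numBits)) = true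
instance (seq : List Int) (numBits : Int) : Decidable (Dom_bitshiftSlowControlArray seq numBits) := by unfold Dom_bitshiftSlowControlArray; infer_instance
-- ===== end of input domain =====

-- B replaces A's per-word carry loop by pack-into-one-big-integer / single shift / unpack
-- (objective: alternative structure, same exact return value; both versions also write the
-- same words back into the list they were given).

-- ===== PORT A =====
-- the for-idx loop of A, carrying 'lastIndexExcess'; each step: shift, OR in the carry,
-- save bits beyond 32, mask to 32 bits
def pvALoop (ws : List Int) (n : Nat) (carry : Int) : List Int :=
  match ws with
  | [] => []
  | w :: rest =>
    let v := PySem.Int.bor (w <<< n) carry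
    PySem.Int.band v 4294967295 :: pvALoop rest n (v >>> (32:Nat))

def bitshiftSlowControlArray (seq : List Int) (numBits : Int) : List Int :=
  pvALoop seq numBits.toNat 0

-- ===== PORT B =====
-- Source B's unpack loop: take the low 32 bits, then shift the big accumulator right by 32
def pvBLoop (k : Nat) (acc : Int) : List Int :=
  match k with
  | 0 => []
  | k' + 1 => PySem.Int.band acc 4294967295 :: pvBLoop k' (acc >>> (32:Nat))

def bitshiftSlowControlArray_alt (seq : List Int) (numBits : Int) : List Int :=
  if seq = [] then seq
  else
    pvBLoop seq.length
      ((seq.reverse.foldl (fun a w => PySem.Int.bor (a <<< (32:Nat)) w) 0) <<< numBits.toNat)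

-- ===== PRECONDITION & SPEC =====
-- Pre_ excludes only the inputs where Python A raises: a negative shift amount on a
-- non-empty list (ValueError from '<<'). On an empty list A returns [] for any numBits.
def Pre_bitshiftSlowControlArray (seq : List Int) (numBits : Int) : Prop :=
  seq = [] ∨ 0 ≤ numBits
instance (seq : List Int) (numBits : Int) : Decidable (Pre_bitshiftSlowControlArray seq numBits) := by unfold Pre_bitshiftSlowControlArray; infer_instance

def pvWitness_bitshiftSlowControlArray : List Int × Int := ([1, -2, 2147483647], 7)

def Spec_bitshiftSlowControlArray (seq : List Int) (numBits : Int) (out : List Int) : Prop := out = bitshiftSlowControlArray_alt seq numBits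
instance (seq : List Int) (numBits : Int) (out : List Int) : Decidable (Spec_bitshiftSlowControlArray seq numBits out) := by unfold Spec_bitshiftSlowControlArray; infer_instance

-- ===== CLAIM (what is proved, stated in full; the proofs are below) =====
def Claim_equal_bitshiftSlowControlArray : Prop := ∀ (seq : List Int) (numBits : Int), Dom_bitshiftSlowControlArray seq numBits → Pre_bitshiftSlowControlArray seq numBits → Spec_bitshiftSlowControlArray seq numBits (bitshiftSlowControlArray seq numBits)

-- ===== LEMMAS AND PROOFS =====

-- Nat groundwork: disjoint addition is OR, and 'm - (m &&& n)' is bitwise difference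
theorem nat_add_eq_or_of_and_eq_zero : ∀ (a b : ℕ), a &&& b = 0 → a + b = a ||| b := by
  intro a
  induction a using Nat.strong_induction_on with
  | _ a ih =>
    intro b h
    rcases Nat.eq_zero_or_pos a with rfl | ha
    · simp
    · have hd : a / 2 &&& b / 2 = 0 := by
        have := Nat.and_div_two (a := a) (b := b); omega
      have hm : a % 2 &&& b % 2 = 0 := by
        have h2 := Nat.and_mod_two_pow (a := a) (b := b) (n := 1)
        simp at h2; omega
      have ihh := ih (a / 2) (by omega) (b / 2) hd
      have hor2 : (a ||| b) / 2 = a / 2 ||| b / 2 := Nat.or_div_two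
      have horm : (a ||| b) % 2 = a % 2 ||| b % 2 := by
        have h2 := Nat.or_mod_two_pow (a := a) (b := b) (n := 1)
        simp at h2; omega
      have hmv : a % 2 ||| b % 2 = a % 2 + b % 2 := by
        have h1 : a % 2 < 2 := Nat.mod_lt _ (by omega)
        have h2 : b % 2 < 2 := Nat.mod_lt _ (by omega)
        interval_cases h3 : a % 2 <;> interval_cases h4 : b % 2 <;> simp_all
      omega

theorem nat_sub_and_eq_ldiff (m n : ℕ) : m - (m &&& n) = Nat.ldiff m n := by
  have hd : Nat.ldiff m n &&& (m &&& n) = 0 := by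
    apply Nat.eq_of_testBit_eq; intro i
    simp [Nat.testBit_and, Nat.testBit_ldiff]
    cases m.testBit i <;> cases n.testBit i <;> simp
  have hor : Nat.ldiff m n ||| (m &&& n) = m := by
    apply Nat.eq_of_testBit_eq; intro i
    simp [Nat.testBit_or, Nat.testBit_and, Nat.testBit_ldiff]
    cases m.testBit i <;> cases n.testBit i <;> simp
  have := nat_add_eq_or_of_and_eq_zero _ _ hd
  have hle : m &&& n ≤ m := Nat.and_le_left
  omega

-- PySem's Python-exact band/bor are Mathlib's Int.land/Int.lor
theorem band_eq_land (a b : Int) : PySem.Int.band a b = Int.land a b := by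
  cases a with
  | ofNat m => cases b with
    | ofNat n => simp [PySem.Int.band, Int.land]
    | negSucc n =>
      simp [PySem.Int.band, Int.land, Int.negSucc_eq, nat_sub_and_eq_ldiff]
      omega
  | negSucc m => cases b with
    | ofNat n =>
      simp [PySem.Int.band, Int.land, Int.negSucc_eq, nat_sub_and_eq_ldiff]
      omega
    | negSucc n =>
      simp [PySem.Int.band, Int.land, Int.negSucc_eq]
      split_ifs <;> omega

theorem bor_eq_lor (a b : Int) : PySem.Int.bor a b = Int.lor a b := by
  cases a with
  | ofNat m => cases b with
    | ofNat n => simp [PySem.Int.bor, Int.lor]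
    | negSucc n =>
      simp [PySem.Int.bor, Int.lor, Int.negSucc_eq, nat_sub_and_eq_ldiff]
      split_ifs <;> omega
  | negSucc m => cases b with
    | ofNat n =>
      simp [PySem.Int.bor, Int.lor, Int.negSucc_eq, nat_sub_and_eq_ldiff]
      split_ifs <;> omega
    | negSucc n =>
      simp [PySem.Int.bor, Int.lor, Int.negSucc_eq]
      split_ifs <;> omega

-- testBit characterisation of Int shifts, and bitwise extensionality for Int
theorem int_testBit_shiftRight (a : Int) (k i : Nat) :
    (a >>> k).testBit i = a.testBit (k + i) := by
  cases a with
  | ofNat m =>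
    show (Int.ofNat (m >>> k)).testBit i = _
    simp [Int.testBit, Nat.testBit_shiftRight]
  | negSucc m =>
    show (Int.negSucc (m >>> k)).testBit i = _
    simp [Int.testBit, Nat.testBit_shiftRight]

theorem int_testBit_shiftLeft (a : Int) (k i : Nat) :
    (a <<< k).testBit i = (decide (k ≤ i) && a.testBit (i - k)) := by
  cases a with
  | ofNat m =>
    show (Int.ofNat (m <<< k)).testBit i = _
    simp [Int.testBit, Nat.testBit_shiftLeft, ge_iff_le]
  | negSucc m =>
    show (Int.negSucc ((m+1) <<< k - 1)).testBit i = _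
    have hrw : (m+1) <<< k - 1 = 2 ^ k * m + (2 ^ k - 1) := by
      have : (m+1) <<< k = (m+1) * 2 ^ k := Nat.shiftLeft_eq _ _
      have h2 : 0 < 2 ^ k := by positivity
      rw [this]; ring_nf; omega
    have hb : 2 ^ k - 1 < 2 ^ k := by
      have h2 : 0 < 2 ^ k := by positivity
      omega
    simp only [Int.testBit, hrw, Nat.testBit_two_pow_mul_add _ hb i]
    by_cases h : i < k
    · have hk : ¬ k ≤ i := by omega
      simp [h, hk, Nat.testBit_two_pow_sub_one]
    · have hk : k ≤ i := by omega
      simp [h, hk]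

theorem int_eq_of_testBit_eq {a b : Int} (h : ∀ i, a.testBit i = b.testBit i) : a = b := by
  cases a with
  | ofNat m => cases b with
    | ofNat n =>
      have := Nat.eq_of_testBit_eq (x := m) (y := n) (fun i => h i)
      simpa using this
    | negSucc n =>
      exfalso
      have hi := h (max m n + 1)
      have h1 : m.testBit (max m n + 1) = false :=
        Nat.testBit_lt_two_pow (lt_of_le_of_lt (Nat.le_max_left m n)
          (lt_trans (Nat.lt_two_pow_self) (Nat.pow_lt_pow_right (by omega) (by omega))))
      have h2 : n.testBit (max m n + 1) = false :=
        Nat.testBit_lt_two_pow (lt_of_le_of_lt (Nat.le_max_right m n)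
          (lt_trans (Nat.lt_two_pow_self) (Nat.pow_lt_pow_right (by omega) (by omega))))
      simp [Int.testBit, h1, h2] at hi
  | negSucc m => cases b with
    | ofNat n =>
      exfalso
      have hi := h (max m n + 1)
      have h1 : m.testBit (max m n + 1) = false :=
        Nat.testBit_lt_two_pow (lt_of_le_of_lt (Nat.le_max_left m n)
          (lt_trans (Nat.lt_two_pow_self) (Nat.pow_lt_pow_right (by omega) (by omega))))
      have h2 : n.testBit (max m n + 1) = false :=
        Nat.testBit_lt_two_pow (lt_of_le_of_lt (Nat.le_max_right m n)
          (lt_trans (Nat.lt_two_pow_self) (Nat.pow_lt_pow_right (by omega) (by omega))))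
      simp [Int.testBit, h1, h2] at hi
    | negSucc n =>
      have : ∀ i, m.testBit i = n.testBit i := by
        intro i; have := h i; simpa [Int.testBit] using this
      simp [Nat.eq_of_testBit_eq this]

-- the mask: testBit of 4294967295 = 2^32 - 1
theorem testBit_mask (i : Nat) : (4294967295 : Int).testBit i = decide (i < 32) := by
  have : (4294967295 : Int) = Int.ofNat 4294967295 := rfl
  rw [this]
  show Nat.testBit 4294967295 i = decide (i < 32)
  have : (4294967295 : Nat) = 2 ^ 32 - 1 := by norm_num
  rw [this, Nat.testBit_two_pow_sub_one]

theorem int_testBit_zero_int (i : Nat) : (0 : Int).testBit i = false := by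
  show Nat.testBit 0 i = false
  simp

-- distribution laws used by the main induction
theorem shiftLeft_bor (a b : Int) (k : Nat) :
    (PySem.Int.bor a b) <<< k = PySem.Int.bor (a <<< k) (b <<< k) := by
  apply int_eq_of_testBit_eq; intro i
  simp only [bor_eq_lor, int_testBit_shiftLeft, Int.testBit_lor]
  by_cases h : k ≤ i <;> simp [h]

theorem shiftRight_bor (a b : Int) (k : Nat) :
    (PySem.Int.bor a b) >>> k = PySem.Int.bor (a >>> k) (b >>> k) := by
  apply int_eq_of_testBit_eq; intro i
  simp only [bor_eq_lor, int_testBit_shiftRight, Int.testBit_lor]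

theorem band_bor (a b m : Int) :
    PySem.Int.band (PySem.Int.bor a b) m =
      PySem.Int.bor (PySem.Int.band a m) (PySem.Int.band b m) := by
  apply int_eq_of_testBit_eq; intro i
  simp only [bor_eq_lor, band_eq_land, Int.testBit_lor, Int.testBit_land]
  cases a.testBit i <;> cases b.testBit i <;> cases m.testBit i <;> simp

theorem shiftLeft_shiftLeft (a : Int) (k l : Nat) :
    (a <<< k) <<< l = a <<< (k + l) := by
  apply int_eq_of_testBit_eq; intro i
  simp only [int_testBit_shiftLeft]
  by_cases h1 : l ≤ i
  · by_cases h2 : k ≤ i - l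
    · have h3 : k + l ≤ i := by omega
      have h4 : i - l - k = i - (k + l) := by omega
      simp [h1, h2, h3, h4]
    · have h3 : ¬ (k + l ≤ i) := by omega
      simp [h1, h2, h3]
  · have h3 : ¬ (k + l ≤ i) := by omega
    simp [h1, h3]

theorem shiftLeft_add_shiftRight (a : Int) (k l : Nat) :
    (a <<< (k + l)) >>> l = a <<< k := by
  apply int_eq_of_testBit_eq; intro i
  simp only [int_testBit_shiftRight, int_testBit_shiftLeft]
  by_cases h : k ≤ i
  · have h1 : k + l ≤ l + i := by omega
    have h2 : l + i - (k + l) = i - k := by omega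
    simp [h, h1, h2]
  · have h1 : ¬ (k + l ≤ l + i) := by omega
    simp [h, h1]

theorem band_shiftLeft_mask (a : Int) (k : Nat) (hk : 32 ≤ k) :
    PySem.Int.band (a <<< k) 4294967295 = 0 := by
  apply int_eq_of_testBit_eq; intro i
  simp only [band_eq_land, Int.testBit_land, int_testBit_shiftLeft, testBit_mask,
    int_testBit_zero_int]
  by_cases h : k ≤ i
  · have : ¬ i < 32 := by omega
    simp [h, this]
  · simp [h]

theorem bor_zero_right (a : Int) : PySem.Int.bor a 0 = a := by
  apply int_eq_of_testBit_eq; intro i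
  simp [bor_eq_lor, Int.testBit_lor, int_testBit_zero_int]

theorem bor_zero_left (a : Int) : PySem.Int.bor 0 a = a := by
  apply int_eq_of_testBit_eq; intro i
  simp [bor_eq_lor, Int.testBit_lor, int_testBit_zero_int]

theorem bor_left_comm (a b c : Int) :
    PySem.Int.bor (PySem.Int.bor a b) c = PySem.Int.bor b (PySem.Int.bor a c) := by
  apply int_eq_of_testBit_eq; intro i
  simp only [bor_eq_lor, Int.testBit_lor]
  cases a.testBit i <;> cases b.testBit i <;> cases c.testBit i <;> simp

theorem bor_swap (a b c : Int) :
    PySem.Int.bor a (PySem.Int.bor b c) = PySem.Int.bor b (PySem.Int.bor a c) := by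
  apply int_eq_of_testBit_eq; intro i
  simp only [bor_eq_lor, Int.testBit_lor]
  cases a.testBit i <;> cases b.testBit i <;> cases c.testBit i <;> simp

-- the packed little-endian big integer of a word list
def pvPack (ws : List Int) : Int :=
  List.foldr (fun w a => PySem.Int.bor (a <<< (32:Nat)) w) 0 ws

-- A's carry loop computes exactly the unpacking of the packed-and-shifted big integer
theorem aLoop_eq_bLoop (ws : List Int) (n : Nat) (carry : Int) :
    pvALoop ws n carry =
      pvBLoop ws.length (PySem.Int.bor (pvPack ws <<< n) carry) := by
  induction ws generalizing carry with
  | nil => simp [pvALoop, pvBLoop]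
  | cons w rest ih =>
    have hpack : pvPack (w :: rest) = PySem.Int.bor (pvPack rest <<< (32:Nat)) w := by
      simp [pvPack]
    have hbig : PySem.Int.bor (pvPack (w :: rest) <<< n) carry =
        PySem.Int.bor (pvPack rest <<< (n + 32))
          (PySem.Int.bor (w <<< n) carry) := by
      rw [hpack, shiftLeft_bor, shiftLeft_shiftLeft, bor_left_comm, Nat.add_comm 32 n, bor_swap]
    simp only [pvALoop, List.length_cons, pvBLoop, hbig]
    refine congrArg₂ List.cons ?_ ?_
    · rw [band_bor (pvPack rest <<< (n + 32)) (PySem.Int.bor (w <<< n) carry) 4294967295,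
        band_shiftLeft_mask (pvPack rest) (n + 32) (by omega), bor_zero_left]
    · rw [shiftRight_bor (pvPack rest <<< (n + 32)) (PySem.Int.bor (w <<< n) carry) 32,
        shiftLeft_add_shiftRight (pvPack rest) n 32]
      exact ih (PySem.Int.bor (w <<< n) carry >>> (32:Nat))

-- B's packing fold over the reversed list is pvPack
theorem foldl_reverse_pack (ws : List Int) :
    ws.reverse.foldl (fun a w => PySem.Int.bor (a <<< (32:Nat)) w) 0 = pvPack ws := by
  rw [List.foldl_reverse]
  simp [pvPack]

-- ===== VERDICT (by name: the statement is the Claim_ definition above) =====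
theorem bitshiftSlowControlArray_spec : Claim_equal_bitshiftSlowControlArray := by
  intro seq numBits _ _
  unfold Spec_bitshiftSlowControlArray bitshiftSlowControlArray bitshiftSlowControlArray_alt
  by_cases h : seq = []
  · subst h; simp [pvALoop]
  · rw [if_neg h, foldl_reverse_pack, aLoop_eq_bLoop, bor_zero_right]
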